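-- pv_equiv track=rewrite | github.com/justkalpane/Shadow-Creator-OS-Phase_01 | scripts/generate_build_values_snapshot.py | _parse_workflow_registry
-- ===== SOURCE A (Python) =====
-- def _parse_workflow_registry(text: str) -> list[dict[str, str]]:
--     workflows: list[dict[str, str]] = []
--     current: dict[str, str] | None = None
--     for raw_line in text.splitlines():
--         stripped = raw_line.strip()
--         if stripped.startswith("- workflow_id:"):
--             if current:
--                 workflows.append(current)
--             current = {"workflow_id": stripped.split(":", 1)[1].strip()}
--         elif current is not None and ":" in stripped:
--             key, value = stripped.split(":", 1)
--             current[key.strip()] = value.strip()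
--     if current:
--         workflows.append(current)
--     return workflows
-- ===== SOURCE B (Python) =====
-- def _parse_workflow_registry(text: str) -> list[dict[str, str]]:
--     def is_header(line: str) -> bool:
--         return line.strip().startswith("- workflow_id:")
--
--     def split_blocks(lines: list[str]) -> list[tuple[str, list[str]]]:
--         blocks = []
--         while lines:
--             head, rest = lines[0], lines[1:]
--             if is_header(head):
--                 body = []
--                 for ln in rest:
--                     if is_header(ln):
--                         break
--                     body.append(ln)
--                 blocks.append((head, body))
--                 lines = rest[len(body):]
--             else:
--                 lines = rest
--         return blocks
--
--     def build(header: str, body: list[str]) -> dict[str, str]: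
--         d = {"workflow_id": header.strip().split(":", 1)[1].strip()}
--         for ln in body:
--             s = ln.strip()
--             if ":" in s:
--                 k, v = s.split(":", 1)
--                 d[k.strip()] = v.strip()
--         return d
--
--     return [build(h, b) for h, b in split_blocks(text.splitlines())]
-- ===== Notes on version B (the rewrite author's own statement) =====
-- stated objective: alternative
-- what changed: Replaced the single-pass stateful accumulator (workflows list plus optional current dict, flushed at each header and at the end) by a two-pass group-then-build decomposition: first split the lines into blocks each beginning at a workflow header line (dropping pre-header lines), then map each block independently to its dict.
import Mathlib
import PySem

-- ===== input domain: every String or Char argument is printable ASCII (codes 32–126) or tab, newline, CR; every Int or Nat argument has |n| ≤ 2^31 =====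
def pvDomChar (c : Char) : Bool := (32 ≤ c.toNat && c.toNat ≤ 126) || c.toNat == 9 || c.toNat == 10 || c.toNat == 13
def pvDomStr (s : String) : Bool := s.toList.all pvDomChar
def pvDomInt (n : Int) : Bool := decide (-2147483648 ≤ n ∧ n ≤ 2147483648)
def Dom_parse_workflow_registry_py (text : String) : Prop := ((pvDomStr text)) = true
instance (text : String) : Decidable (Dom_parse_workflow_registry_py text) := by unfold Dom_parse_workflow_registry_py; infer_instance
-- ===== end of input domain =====

-- B replaces A's single-pass stateful accumulator by a two-pass group-then-build decomposition (objective: alternative).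

-- ===== PORT A =====
-- s.split(":", 1) (separator nonempty, so splitMax? is always `some`)
def pvSplit1 (s : String) : List String := (PySem.Str.splitMax? s ":" 1).getD []

-- one iteration of A's for-loop, state = (workflows, current)
def pvStepA (st : List (PySem.Dict String String) × Option (PySem.Dict String String))
    (raw_line : String) : List (PySem.Dict String String) × Option (PySem.Dict String String) :=
  let stripped := PySem.Str.strip raw_line
  if PySem.Str.startswith stripped "- workflow_id:" then
    let ws := match st.2 with
      | some c => if c.items.isEmpty then st.1 else st.1 ++ [c]   -- `if current:` (truthiness)
      | none => st.1
    (ws, some (PySem.Dict.ofList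
      [("workflow_id", PySem.Str.strip (PySem.List.pyGetD (pvSplit1 stripped) 1 ""))]))
  else
    match st.2 with
    | some c =>
        if PySem.Str.isIn ":" stripped then
          let parts := pvSplit1 stripped
          (st.1, some (c.insert (PySem.Str.strip (PySem.List.pyGetD parts 0 ""))
                                (PySem.Str.strip (PySem.List.pyGetD parts 1 ""))))
        else st
    | none => st

def parse_workflow_registry_py (text : String) : List (List (String × String)) :=
  let st := (PySem.Str.splitlines text).foldl pvStepA ([], none)
  let workflows := match st.2 with
    | some c => if c.items.isEmpty then st.1 else st.1 ++ [c]     -- final `if current:` flush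
    | none => st.1
  workflows.map (·.items)

-- ===== PORT B =====
def pvIsHeader (line : String) : Bool :=
  PySem.Str.startswith (PySem.Str.strip line) "- workflow_id:"

-- Source B split_blocks: group the lines into (header, body) blocks, dropping pre-header lines
def pvSplitBlocks : List String → List (String × List String)
  | [] => []
  | l :: ls =>
    if pvIsHeader l then
      (l, ls.takeWhile (fun x => !pvIsHeader x)) ::
        pvSplitBlocks (ls.dropWhile (fun x => !pvIsHeader x))
    else pvSplitBlocks ls
termination_by ls => ls.length
decreasing_by
  · simpa using Nat.lt_succ_of_le (List.length_dropWhile_le _ _)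
  · simp

-- the `d[key.strip()] = value.strip()` line (shared verbatim by both Pythons)
def pvKV (d : PySem.Dict String String) (ln : String) : PySem.Dict String String :=
  if PySem.Str.isIn ":" (PySem.Str.strip ln) then
    d.insert (PySem.Str.strip (PySem.List.pyGetD (pvSplit1 (PySem.Str.strip ln)) 0 ""))
             (PySem.Str.strip (PySem.List.pyGetD (pvSplit1 (PySem.Str.strip ln)) 1 ""))
  else d

-- Source B build: one dict from a header line and its body lines
def pvBuild (header : String) (body : List String) : PySem.Dict String String :=
  body.foldl pvKV
    (PySem.Dict.ofList
      [("workflow_id", PySem.Str.strip (PySem.List.pyGetD (pvSplit1 (PySem.Str.strip header)) 1 ""))])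

def parse_workflow_registry_py_alt (text : String) : List (List (String × String)) :=
  (pvSplitBlocks (PySem.Str.splitlines text)).map (fun hb => (pvBuild hb.1 hb.2).items)

-- ===== PRECONDITION & SPEC =====
def Spec_parse_workflow_registry_py (text : String) (out : List (List (String × String))) : Prop := out = parse_workflow_registry_py_alt text
instance (text : String) (out : List (List (String × String))) : Decidable (Spec_parse_workflow_registry_py text out) := by unfold Spec_parse_workflow_registry_py; infer_instance

-- ===== CLAIM (what is proved, stated in full; the proofs are below) =====
def Claim_equal_parse_workflow_registry_py : Prop := ∀ (text : String), Dom_parse_workflow_registry_py text → Spec_parse_workflow_registry_py text (parse_workflow_registry_py text)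

-- ===== LEMMAS AND PROOFS =====

-- flush of A's final state
def pvFlush (st : List (PySem.Dict String String) × Option (PySem.Dict String String)) :
    List (PySem.Dict String String) :=
  match st.2 with
  | some c => if c.items.isEmpty then st.1 else st.1 ++ [c]
  | none => st.1

theorem pvInsert_items_ne_nil (d : PySem.Dict String String) (k v : String)
    (h : d.items ≠ []) : (d.insert k v).items ≠ [] := by
  rw [PySem.Dict.items_insert]
  split_ifs with hc
  · simpa using h
  · simp

theorem pvFoldKV_items_ne_nil (b : List String) (d : PySem.Dict String String)
    (h : d.items ≠ []) : (b.foldl pvKV d).items ≠ [] := by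
  induction b generalizing d with
  | nil => simpa using h
  | cons ln b ih =>
    simp only [List.foldl_cons]
    apply ih
    unfold pvKV
    split_ifs with hin
    · exact pvInsert_items_ne_nil _ _ _ h
    · exact h

theorem pvOfList_singleton_items_ne_nil (k v : String) :
    (PySem.Dict.ofList [(k, v)]).items ≠ [] := by
  simp [PySem.Dict.ofList, PySem.Dict.update, PySem.Dict.items_insert]

-- the dict A starts at a header line, named for the proofs
def pvInit (l : String) : PySem.Dict String String :=
  PySem.Dict.ofList
    [("workflow_id", PySem.Str.strip (PySem.List.pyGetD (pvSplit1 (PySem.Str.strip l)) 1 ""))]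

theorem pvInit_items_ne_nil (l : String) : (pvInit l).items ≠ [] := by
  unfold pvInit
  exact pvOfList_singleton_items_ne_nil _ _

theorem pvStepA_header_some (ws : List (PySem.Dict String String))
    (c : PySem.Dict String String) (l : String) (hH : pvIsHeader l = true)
    (hc : c.items ≠ []) :
    pvStepA (ws, some c) l = (ws ++ [c], some (pvInit l)) := by
  unfold pvIsHeader at hH
  simp only [pvStepA, pvInit, hH, if_true]
  rw [if_neg (by simpa [List.isEmpty_iff] using hc)]

theorem pvStepA_header_none (ws : List (PySem.Dict String String))
    (l : String) (hH : pvIsHeader l = true) :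
    pvStepA (ws, none) l = (ws, some (pvInit l)) := by
  unfold pvIsHeader at hH
  simp only [pvStepA, pvInit, hH, if_true]

theorem pvStepA_body (ws : List (PySem.Dict String String))
    (c : PySem.Dict String String) (l : String) (hH : pvIsHeader l = false) :
    pvStepA (ws, some c) l = (ws, some (pvKV c l)) := by
  unfold pvIsHeader at hH
  simp only [pvStepA, pvKV, pvSplit1, hH, Bool.false_eq_true, if_false]
  split_ifs <;> rfl

theorem pvStepA_dead (ws : List (PySem.Dict String String)) (l : String)
    (hH : pvIsHeader l = false) :
    pvStepA (ws, none) l = (ws, none) := by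
  unfold pvIsHeader at hH
  simp only [pvStepA, hH, Bool.false_eq_true, if_false]

-- Lemma 2: folding A's step with a live current dict over ls
theorem pvFold_some (ls : List String) (ws : List (PySem.Dict String String))
    (c : PySem.Dict String String) (hc : c.items ≠ []) :
    pvFlush (ls.foldl pvStepA (ws, some c)) =
      ws ++ [ (ls.takeWhile (fun x => !pvIsHeader x)).foldl pvKV c ]
        ++ (pvSplitBlocks (ls.dropWhile (fun x => !pvIsHeader x))).map (fun hb => pvBuild hb.1 hb.2) := by
  induction ls generalizing ws c with
  | nil =>
    simp [pvFlush, pvSplitBlocks, hc]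
  | cons l ls ih =>
    simp only [List.foldl_cons]
    by_cases hH : pvIsHeader l
    · rw [pvStepA_header_some ws c l hH hc]
      rw [ih _ _ (pvInit_items_ne_nil l)]
      rw [List.takeWhile_cons_of_neg (by simp [hH]), List.dropWhile_cons_of_neg (by simp [hH])]
      rw [pvSplitBlocks]
      simp only [hH, if_true, List.map_cons]
      simp [pvBuild, pvInit]
    · rw [pvStepA_body ws c l (by simpa using hH)]
      rw [ih _ _ (by
        apply pvFoldKV_items_ne_nil [l]
        simpa using hc)]
      rw [List.takeWhile_cons_of_pos (by simp [hH]), List.dropWhile_cons_of_pos (by simp [hH])]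
      simp

-- Lemma 1: the main loop from a dead current
theorem pvFold_none (ls : List String) (ws : List (PySem.Dict String String)) :
    pvFlush (ls.foldl pvStepA (ws, none)) =
      ws ++ (pvSplitBlocks ls).map (fun hb => pvBuild hb.1 hb.2) := by
  induction ls generalizing ws with
  | nil => simp [pvFlush, pvSplitBlocks]
  | cons l ls ih =>
    simp only [List.foldl_cons]
    by_cases hH : pvIsHeader l
    · rw [pvStepA_header_none ws l hH,
          pvFold_some ls ws _ (pvInit_items_ne_nil l), pvSplitBlocks]
      simp only [hH, if_true, List.map_cons]
      simp [pvBuild, pvInit]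
    · rw [pvStepA_dead ws l (by simpa using hH), ih, pvSplitBlocks]
      simp [hH]

-- ===== VERDICT (by name: the statement is the Claim_ definition above) =====
theorem parse_workflow_registry_py_spec : Claim_equal_parse_workflow_registry_py := by
  intro text _
  unfold Spec_parse_workflow_registry_py parse_workflow_registry_py parse_workflow_registry_py_alt
  have h := pvFold_none (PySem.Str.splitlines text) []
  simp only [pvFlush] at h
  simp only [h, List.nil_append, List.map_map]
  rfl
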